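-- pv_equiv track=rewrite | github.com/wsmorgan/phonon-enumeration | phenum/phonons.py | _col_sort
-- ===== SOURCE A (Python) =====
-- def _col_sort(col_list):
--     """Sorts the labeling so that colors with arrows appear last in the
--     list and so that the arrowed and non-arrowed colors are sorted
--     from lowest to highest concentration.
--
--     Args:
--         col_list (list): A 2D integer array of the full labeling of the
--           system.
--
--     Returns:
--         colt (list): A 2D integer array of the sorted colors.
--     """
--
--     col1 = []
--     col2 = []
--     colt=[]
--
--     # seperate the arrays into colors with arrrows and colors without
--     for i in col_list:
--         if i[0] < 0:
--             col1.append(i)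
--         elif i[0] >= 0:
--             col2.append(i)
--
--     # sort each array by concentration
--     col1 = sorted(col1, key = col1.count)
--     col2 = sorted(col2, key = col2.count)
--     # put them back together again
--     for i in col1:
--         colt.append(i)
--     for i in col2:
--         colt.append(i)
--     return(colt)
-- ===== SOURCE B (Python) =====
-- def _col_sort(col_list):
--     """Single stable sort with a composite key: sign group first (arrowed/
--     negative rows before non-negative), then concentration (frequency).
--     Whole-list count equals within-group count because equal rows share
--     their first element's sign."""
--     return sorted(col_list, key=lambda i: (0 if i[0] < 0 else 1, col_list.count(i)))
-- ===== Notes on version B (the rewrite author's own statement) =====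
-- stated objective: idiomatic
-- what changed: A's partition into negative-head/non-negative-head lists, two separate count-keyed stable sorts and re-concatenation loops are replaced by ONE stable sort of the whole list under the composite key (sign group, whole-list frequency); equal rows share their head's sign, so the whole-list count equals A's within-group count, and stability preserves A's tie order. Pre_ excludes inputs containing an empty row, on which both A and B raise IndexError at i[0].
import Mathlib
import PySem

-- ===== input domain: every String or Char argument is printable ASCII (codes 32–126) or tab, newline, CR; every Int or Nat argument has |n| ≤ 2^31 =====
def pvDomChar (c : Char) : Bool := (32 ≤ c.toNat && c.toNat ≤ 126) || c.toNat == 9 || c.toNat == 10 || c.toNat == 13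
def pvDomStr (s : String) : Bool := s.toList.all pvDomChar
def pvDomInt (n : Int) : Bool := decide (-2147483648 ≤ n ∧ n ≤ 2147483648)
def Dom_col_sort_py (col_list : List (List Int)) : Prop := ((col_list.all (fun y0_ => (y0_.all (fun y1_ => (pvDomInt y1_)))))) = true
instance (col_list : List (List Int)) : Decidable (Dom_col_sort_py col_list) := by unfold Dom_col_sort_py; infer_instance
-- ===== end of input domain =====

-- B replaces A's partition + two count-keyed sorts + concatenation by ONE stable sort with the
-- composite key (sign group, whole-list frequency); equal rows share their head's sign, so the
-- whole-list count equals A's within-group count. Objective: idiomatic (same asymptotic cost).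

-- ===== PORT A =====
-- `i[0]` is ported as PySem.List.pyGetD i 0 0 (exact on Pre_, which excludes empty rows,
-- where Python raises IndexError).
def col_sort_py (col_list : List (List Int)) : List (List Int) :=
  let pr := col_list.foldl (fun acc i =>
      if PySem.List.pyGetD i 0 0 < 0 then (acc.1 ++ [i], acc.2)
      else if PySem.List.pyGetD i 0 0 ≥ 0 then (acc.1, acc.2 ++ [i])
      else acc) ([], [])
  let col1 := PySem.List.sorted pr.1 (fun i => PySem.List.count pr.1 i) false
  let col2 := PySem.List.sorted pr.2 (fun i => PySem.List.count pr.2 i) false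
  let colt := col1.foldl (fun acc i => acc ++ [i]) []
  col2.foldl (fun acc i => acc ++ [i]) colt

-- ===== PORT B =====
def col_sort_py_alt (col_list : List (List Int)) : List (List Int) :=
  PySem.List.sorted2 col_list
    (fun i => if PySem.List.pyGetD i 0 0 < 0 then (0 : Int) else 1)
    (fun i => PySem.List.count col_list i) false

-- ===== PRECONDITION & SPEC =====
-- Pre_ excludes inputs containing an empty row, on which A (and B alike) raise IndexError at i[0].
def Pre_col_sort_py (col_list : List (List Int)) : Prop := ∀ y ∈ col_list, y ≠ []
instance (col_list : List (List Int)) : Decidable (Pre_col_sort_py col_list) := by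
  unfold Pre_col_sort_py; infer_instance

def pvWitness_col_sort_py : List (List Int) := [[-1], [2], [2], [-1], [3]]

def Spec_col_sort_py (col_list : List (List Int)) (out : List (List Int)) : Prop := out = col_sort_py_alt col_list
instance (col_list : List (List Int)) (out : List (List Int)) : Decidable (Spec_col_sort_py col_list out) := by unfold Spec_col_sort_py; infer_instance

-- ===== CLAIM (what is proved, stated in full; the proofs are below) =====
def Claim_equal_col_sort_py : Prop := ∀ (col_list : List (List Int)), Dom_col_sort_py col_list → Pre_col_sort_py col_list → Spec_col_sort_py col_list (col_sort_py col_list)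

-- ===== LEMMAS AND PROOFS =====

-- unfolding equations of PySem.List.insertBy (definitional)
theorem insertBy_nil {α : Type} (b : α → α → Bool) (x : α) :
    PySem.List.insertBy b x [] = [x] := rfl

theorem insertBy_cons {α : Type} (b : α → α → Bool) (x y : α) (ys : List α) :
    PySem.List.insertBy b x (y :: ys) =
      if b x y then x :: y :: ys else y :: PySem.List.insertBy b x ys := rfl

-- insertBy only compares x against members of ys
theorem insertBy_congr {α : Type} (b1 b2 : α → α → Bool) (x : α) (ys : List α)
    (h : ∀ y ∈ ys, b1 x y = b2 x y) :
    PySem.List.insertBy b1 x ys = PySem.List.insertBy b2 x ys := by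
  induction ys with
  | nil => rfl
  | cons y ys ih =>
    rw [insertBy_cons, insertBy_cons, h y (List.mem_cons_self)]
    by_cases hb : b2 x y
    · simp [hb]
    · simp only [hb, Bool.false_eq_true, ite_false]
      rw [ih (fun z hz => h z (List.mem_cons_of_mem _ hz))]

-- x goes before every element of zs ⇒ it lands inside (or at the end of) ys
theorem insertBy_append_left {α : Type} (b : α → α → Bool) (x : α) (ys zs : List α)
    (h : ∀ z ∈ zs, b x z = true) :
    PySem.List.insertBy b x (ys ++ zs) = PySem.List.insertBy b x ys ++ zs := by
  induction ys with
  | nil =>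
    cases zs with
    | nil => rfl
    | cons z zs => simp [insertBy_nil, insertBy_cons, h z List.mem_cons_self]
  | cons y ys ih =>
    rw [List.cons_append, insertBy_cons, insertBy_cons]
    by_cases hb : b x y
    · simp [hb]
    · simp [hb, ih]

-- x goes after every element of ys ⇒ it passes through ys
theorem insertBy_append_right {α : Type} (b : α → α → Bool) (x : α) (ys zs : List α)
    (h : ∀ y ∈ ys, b x y = false) :
    PySem.List.insertBy b x (ys ++ zs) = ys ++ PySem.List.insertBy b x zs := by
  induction ys with
  | nil => rfl
  | cons y ys ih =>
    rw [List.cons_append, insertBy_cons, h y List.mem_cons_self]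
    simp [ih (fun z hz => h z (List.mem_cons_of_mem _ hz))]

-- a stable insertion sort keyed by (group, k) is the group-0 sort followed by the group-1 sort
theorem merge_lemma {α : Type} (P : α → Prop) [DecidablePred P] (k : α → Nat) :
    ∀ (xs acc1 acc2 : List α), (∀ a ∈ acc1, P a) → (∀ a ∈ acc2, ¬ P a) →
    xs.foldl (fun acc x => PySem.List.insertBy
        (fun a b => decide ((if P a then (0 : Int) else 1) < (if P b then (0 : Int) else 1)) ||
          (!decide ((if P b then (0 : Int) else 1) < (if P a then (0 : Int) else 1)) &&
            decide (k a < k b))) x acc) (acc1 ++ acc2)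
    = (xs.filter (fun x => decide (P x))).foldl
        (fun acc x => PySem.List.insertBy (fun a b => decide (k a < k b)) x acc) acc1
      ++ (xs.filter (fun x => !decide (P x))).foldl
        (fun acc x => PySem.List.insertBy (fun a b => decide (k a < k b)) x acc) acc2 := by
  intro xs
  induction xs with
  | nil => intro acc1 acc2 _ _; rfl
  | cons x xs ih =>
    intro acc1 acc2 h1 h2
    by_cases hp : P x
    · have hstep : PySem.List.insertBy
          (fun a b => decide ((if P a then (0 : Int) else 1) < (if P b then (0 : Int) else 1)) ||
            (!decide ((if P b then (0 : Int) else 1) < (if P a then (0 : Int) else 1)) &&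
              decide (k a < k b))) x (acc1 ++ acc2)
          = PySem.List.insertBy (fun a b => decide (k a < k b)) x acc1 ++ acc2 := by
        rw [insertBy_append_left _ x acc1 acc2 (by
          intro z hz
          simp [if_pos hp, if_neg (h2 z hz)])]
        rw [insertBy_congr _ (fun a b => decide (k a < k b)) x acc1 (by
          intro y hy
          simp [if_pos hp, if_pos (h1 y hy)])]
      simp only [List.foldl_cons, List.filter_cons, hp, decide_true, Bool.not_true,
        Bool.false_eq_true, ite_false, ite_true, List.foldl_cons, hstep]
      exact ih _ acc2 (by
        intro a ha
        rcases (PySem.List.mem_insertBy _ x a acc1).1 ha with h | h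
        · exact h ▸ hp
        · exact h1 a h) h2
    · have hstep : PySem.List.insertBy
          (fun a b => decide ((if P a then (0 : Int) else 1) < (if P b then (0 : Int) else 1)) ||
            (!decide ((if P b then (0 : Int) else 1) < (if P a then (0 : Int) else 1)) &&
              decide (k a < k b))) x (acc1 ++ acc2)
          = acc1 ++ PySem.List.insertBy (fun a b => decide (k a < k b)) x acc2 := by
        rw [insertBy_append_right _ x acc1 acc2 (by
          intro y hy
          simp [if_neg hp, if_pos (h1 y hy)])]
        rw [insertBy_congr _ (fun a b => decide (k a < k b)) x acc2 (by
          intro y hy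
          simp [if_neg hp, if_neg (h2 y hy)])]
      simp only [List.foldl_cons, List.filter_cons, hp, decide_false, Bool.not_false,
        Bool.false_eq_true, ite_false, ite_true, List.foldl_cons, hstep]
      exact ih acc1 _ h1 (by
        intro a ha
        rcases (PySem.List.mem_insertBy _ x a acc2).1 ha with h | h
        · exact h ▸ hp
        · exact h2 a h)

-- sorting depends on the key only through its values on members
theorem foldl_insertBy_key_congr {α : Type} (k1 k2 : α → Nat) (S : List α)
    (hS : ∀ x ∈ S, k1 x = k2 x) :
    ∀ (xs acc : List α), (∀ x ∈ xs, x ∈ S) → (∀ x ∈ acc, x ∈ S) →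
    xs.foldl (fun acc x => PySem.List.insertBy (fun a b => decide (k1 a < k1 b)) x acc) acc
    = xs.foldl (fun acc x => PySem.List.insertBy (fun a b => decide (k2 a < k2 b)) x acc) acc := by
  intro xs
  induction xs with
  | nil => intro acc _ _; rfl
  | cons x xs ih =>
    intro acc hxs hacc
    have hx : x ∈ S := hxs x List.mem_cons_self
    simp only [List.foldl_cons]
    rw [insertBy_congr _ (fun a b => decide (k2 a < k2 b)) x acc (by
      intro y hy
      rw [hS x hx, hS y (hacc y hy)])]
    exact ih _ (fun z hz => hxs z (List.mem_cons_of_mem _ hz)) (by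
      intro z hz
      rcases (PySem.List.mem_insertBy _ x z acc).1 hz with h | h
      · exact h ▸ hx
      · exact hacc z h)

theorem sorted_key_congr {α : Type} (xs : List α) (k1 k2 : α → Nat)
    (h : ∀ x ∈ xs, k1 x = k2 x) :
    PySem.List.sorted xs k1 false = PySem.List.sorted xs k2 false := by
  rw [PySem.List.sorted_eq_foldl_insertBy, PySem.List.sorted_eq_foldl_insertBy]
  exact foldl_insertBy_key_congr k1 k2 xs h xs [] (fun x hx => hx) (by simp)

-- the count of a member of a filtered list equals its count in the whole list
theorem count_filter_eq {p : List Int → Bool} (c : List (List Int)) (x : List Int)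
    (hx : x ∈ c.filter p) :
    PySem.List.count (c.filter p) x = PySem.List.count c x := by
  rw [PySem.List.count_eq, PySem.List.count_eq]
  exact List.count_filter (List.mem_filter.1 hx).2

-- A's partition loop, named
theorem colA_gen (c : List (List Int)) : ∀ a1 a2 : List (List Int),
    c.foldl (fun acc i =>
      if PySem.List.pyGetD i 0 0 < 0 then (acc.1 ++ [i], acc.2)
      else if PySem.List.pyGetD i 0 0 ≥ 0 then (acc.1, acc.2 ++ [i])
      else acc) (a1, a2)
    = (a1 ++ c.filter (fun i => decide (PySem.List.pyGetD i 0 0 < 0)),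
       a2 ++ c.filter (fun i => !decide (PySem.List.pyGetD i 0 0 < 0))) := by
  induction c with
  | nil => simp
  | cons x xs ih =>
    intro a1 a2
    simp only [List.foldl_cons, List.filter_cons]
    by_cases h : PySem.List.pyGetD x 0 0 < 0
    · simp [h, ih]
    · have h2 : PySem.List.pyGetD x 0 0 ≥ 0 := by omega
      simp [h, h2, ih]

theorem colA_eq (c : List (List Int)) :
    c.foldl (fun acc i =>
      if PySem.List.pyGetD i 0 0 < 0 then (acc.1 ++ [i], acc.2)
      else if PySem.List.pyGetD i 0 0 ≥ 0 then (acc.1, acc.2 ++ [i])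
      else acc) (([] : List (List Int)), ([] : List (List Int)))
    = (c.filter (fun i => decide (PySem.List.pyGetD i 0 0 < 0)),
       c.filter (fun i => !decide (PySem.List.pyGetD i 0 0 < 0))) := by
  simpa using colA_gen c [] []

-- ===== VERDICT (by name: the statement is the Claim_ definition above) =====
theorem col_sort_py_spec : Claim_equal_col_sort_py := by
  intro c _ _
  unfold Spec_col_sort_py col_sort_py col_sort_py_alt
  simp only [colA_eq]
  rw [PySem.List.foldl_append_singleton_eq_self, PySem.List.foldl_append_singleton_eq_self,
    List.nil_append]
  have hB : PySem.List.sorted2 c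
      (fun i => if PySem.List.pyGetD i 0 0 < 0 then (0 : Int) else 1)
      (fun i => PySem.List.count c i) false
      = c.foldl (fun acc x => PySem.List.insertBy
          (fun a b => decide ((if PySem.List.pyGetD a 0 0 < 0 then (0 : Int) else 1) <
              (if PySem.List.pyGetD b 0 0 < 0 then (0 : Int) else 1)) ||
            (!decide ((if PySem.List.pyGetD b 0 0 < 0 then (0 : Int) else 1) <
              (if PySem.List.pyGetD a 0 0 < 0 then (0 : Int) else 1)) &&
              decide (PySem.List.count c a < PySem.List.count c b))) x acc) [] := rfl
  have hm := merge_lemma (fun i => PySem.List.pyGetD i 0 0 < 0)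
    (fun i => PySem.List.count c i) c [] [] (by simp) (by simp)
  rw [List.nil_append] at hm
  rw [hB, hm]
  rw [sorted_key_congr _ _ (fun i => PySem.List.count c i)
      (fun x hx => count_filter_eq c x hx),
    sorted_key_congr _ _ (fun i => PySem.List.count c i)
      (fun x hx => count_filter_eq c x hx)]
  rw [PySem.List.sorted_eq_foldl_insertBy, PySem.List.sorted_eq_foldl_insertBy]
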